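-- pv_equiv track=rewrite | github.com/blcksy/sia | sia/cnf.py | to_3_sat
-- ===== SOURCE A (Python) =====
-- def to_3_sat(n, clauses):
--     '''Converts a CNF instance into a 3-CNF instance'''
--     aux = []
--     for clause in clauses:
--         if len(clause) <= 3:
--             aux.append(clause)
--         else:
--             total = len(clause)-4
--             # Start
--             aux.append(clause[0:2] + [-n-1])
--             # Mid
--             for i in range(total):
--                 aux.append([n+1, clause[2+i], -n-2])
--                 n += 1
--             # End
--             aux.append([n+1] + clause[-2:])
--             n += 1
--     return aux
-- ===== SOURCE B (Python) =====
-- def _expand(base, clause):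
--     '''3-CNF block for one clause, a pure function of its aux-variable base.'''
--     L = len(clause)
--     if L <= 3:
--         return [clause]
--     return ([[clause[0], clause[1], -(base + 1)]]
--             + [[base + j, clause[j + 1], -(base + j + 1)] for j in range(1, L - 3)]
--             + [[base + L - 3, clause[-2], clause[-1]]])
--
-- def to_3_sat(n, clauses):
--     '''Converts a CNF instance into a 3-CNF instance'''
--     # Stage 1: prefix-sum the aux-variable bases (each long clause consumes len-3 vars).
--     bases = []
--     for clause in clauses:
--         bases.append(n)
--         n += max(len(clause) - 3, 0)
--     # Stage 2: each clause expands independently from its base.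
--     return [c for base, clause in zip(bases, clauses) for c in _expand(base, clause)]
-- ===== Notes on version B (the rewrite author's own statement) =====
-- stated objective: alternative
-- what changed: A's single stateful pass (one running counter mutated while emitting start/mid/end pieces) is replaced by two stages: a first pass prefix-sums each clause's aux-variable base (len-3 vars per long clause), then each (base, clause) pair is mapped independently to its 3-CNF block by closed-form indexing and the blocks are concatenated.
import Mathlib
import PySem

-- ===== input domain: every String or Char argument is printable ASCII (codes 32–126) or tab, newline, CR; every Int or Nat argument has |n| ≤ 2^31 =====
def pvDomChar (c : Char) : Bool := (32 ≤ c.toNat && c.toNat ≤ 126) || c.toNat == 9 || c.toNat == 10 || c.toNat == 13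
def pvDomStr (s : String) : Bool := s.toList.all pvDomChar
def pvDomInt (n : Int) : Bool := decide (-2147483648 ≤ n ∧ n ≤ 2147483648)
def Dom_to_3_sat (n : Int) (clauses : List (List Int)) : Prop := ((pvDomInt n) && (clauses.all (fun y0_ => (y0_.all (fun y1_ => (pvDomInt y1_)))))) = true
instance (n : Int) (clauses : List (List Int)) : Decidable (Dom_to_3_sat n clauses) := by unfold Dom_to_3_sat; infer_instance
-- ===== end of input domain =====

-- B replaces A's single stateful pass by two stages (prefix-summed aux bases, then an
-- independent closed-form expansion of each clause); the return values agree on all inputs.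

-- ===== PORT A =====
-- Loop body of A's 'for clause in clauses'; the state is (n, aux).
-- clause[2+i] is always in range when the mid loop runs (i < len(clause)-4, so
-- 2+i < len(clause)), hence the total form pyGetD is exact here.
def stepA (st : Int × List (List Int)) (clause : List Int) : Int × List (List Int) :=
  if (clause.length : Int) ≤ 3 then (st.1, st.2 ++ [clause])
  else
    let total : Int := (clause.length : Int) - 4
    let aux1 := st.2 ++ [PySem.List.slice clause (some 0) (some 2) ++ [-st.1 - 1]]
    let st2 := (PySem.List.pyRange 0 total 1).foldl
      (fun (st : Int × List (List Int)) i =>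
        (st.1 + 1, st.2 ++ [[st.1 + 1, PySem.List.pyGetD clause (2 + i) 0, -st.1 - 2]]))
      (st.1, aux1)
    (st2.1 + 1, st2.2 ++ [[st2.1 + 1] ++ PySem.List.slice clause (some (-2)) none])

def to_3_sat (n : Int) (clauses : List (List Int)) : List (List Int) :=
  (clauses.foldl stepA (n, [])).2

-- ===== PORT B =====
-- _expand: the 3-CNF block of one clause as a pure function of its aux base.
-- All indices are in range when len(clause) ≥ 4 (j+1 ≤ len-3 < len), so pyGetD is exact.
def expandClause (base : Int) (clause : List Int) : List (List Int) :=
  if (clause.length : Int) ≤ 3 then [clause]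
  else
    [[PySem.List.pyGetD clause 0 0, PySem.List.pyGetD clause 1 0, -(base + 1)]]
    ++ (PySem.List.pyRange 1 ((clause.length : Int) - 3) 1).map
         (fun j => [base + j, PySem.List.pyGetD clause (j + 1) 0, -(base + j + 1)])
    ++ [[base + (clause.length : Int) - 3,
         PySem.List.pyGetD clause (-2) 0, PySem.List.pyGetD clause (-1) 0]]

-- Stage 1: the bases list (a fold appending st.1); stage 2: flatten the per-pair blocks.
def to_3_sat_alt (n : Int) (clauses : List (List Int)) : List (List Int) :=
  let bases := (clauses.foldl
    (fun (st : Int × List Int) clause =>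
      (st.1 + max ((clause.length : Int) - 3) 0, st.2 ++ [st.1])) (n, [])).2
  (bases.zip clauses).flatMap (fun p => expandClause p.1 p.2)

-- ===== PRECONDITION & SPEC =====
def Spec_to_3_sat (n : Int) (clauses : List (List Int)) (out : List (List Int)) : Prop := out = to_3_sat_alt n clauses
instance (n : Int) (clauses : List (List Int)) (out : List (List Int)) : Decidable (Spec_to_3_sat n clauses out) := by unfold Spec_to_3_sat; infer_instance

-- ===== CLAIM (what is proved, stated in full; the proofs are below) =====
def Claim_equal_to_3_sat : Prop := ∀ (n : Int) (clauses : List (List Int)), Dom_to_3_sat n clauses → Spec_to_3_sat n clauses (to_3_sat n clauses)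

-- ===== LEMMAS AND PROOFS =====

-- weight of a clause: how many aux variables it consumes
def wCl (c : List Int) : Int := max ((c.length : Int) - 3) 0

-- recursive reference form both ports are reduced to
def goRef (n : Int) : List (List Int) → List (List Int)
  | [] => []
  | c :: cs => expandClause n c ++ goRef (n + wCl c) cs

def basesL (n : Int) : List (List Int) → List Int
  | [] => []
  | c :: cs => n :: basesL (n + wCl c) cs

def nFin (n : Int) : List (List Int) → Int
  | [] => n
  | c :: cs => nFin (n + wCl c) cs

theorem foldB_eq (cs : List (List Int)) (n : Int) (bs : List Int) :
    cs.foldl (fun (st : Int × List Int) clause =>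
      (st.1 + max ((clause.length : Int) - 3) 0, st.2 ++ [st.1])) (n, bs)
    = (nFin n cs, bs ++ basesL n cs) := by
  induction cs generalizing n bs with
  | nil => simp [nFin, basesL]
  | cons c cs ih => simp [nFin, basesL, ih, wCl]

theorem zip_flat_eq (cs : List (List Int)) (n : Int) :
    ((basesL n cs).zip cs).flatMap (fun p => expandClause p.1 p.2) = goRef n cs := by
  induction cs generalizing n with
  | nil => simp [basesL, goRef]
  | cons c cs ih => simp [basesL, goRef, ih]

theorem alt_eq_goRef (n : Int) (cs : List (List Int)) : to_3_sat_alt n cs = goRef n cs := by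
  unfold to_3_sat_alt
  rw [foldB_eq]
  simpa using zip_flat_eq cs n

theorem amid_closed (t : Nat) (clause : List Int) (n : Int) (aux : List (List Int)) :
    (PySem.List.pyRange 0 (t : Int) 1).foldl
      (fun (st : Int × List (List Int)) i =>
        (st.1 + 1, st.2 ++ [[st.1 + 1, PySem.List.pyGetD clause (2 + i) 0, -st.1 - 2]]))
      (n, aux)
    = (n + t, aux ++ (List.range t).map
        (fun (j : Nat) => [n + 1 + (j : Int), PySem.List.pyGetD clause (2 + (j : Int)) 0,
                   -n - 2 - (j : Int)])) := by
  induction t with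
  | zero => simp [PySem.List.pyRange_one_eq_nil]
  | succ t ih =>
    have hcast : ((t + 1 : Nat) : Int) = (t : Int) + 1 := by push_cast; ring
    rw [hcast, PySem.List.pyRange_one_succ_right (by positivity), List.foldl_append, ih]
    simp only [List.foldl_cons, List.foldl_nil, List.range_succ, List.map_append, List.map_cons,
      List.map_nil, ← List.append_assoc]
    refine Prod.ext ?_ ?_
    · show n + (t : Int) + 1 = _
      push_cast; ring
    · show _ ++ [_] = _ ++ [_]
      refine congrArg₂ (· ++ ·) rfl ?_
      simp only [List.cons.injEq, and_true]
      and_intros <;> (push_cast; try ring)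

theorem two_tail (r : List Int) (h : 2 ≤ r.length) : ∃ m y z, r = m ++ [y, z] := by
  rcases hr : r.reverse with _ | ⟨z, rest⟩
  · have hl : r.length = 0 := by simpa using congrArg List.length hr
    omega
  · rcases rest with _ | ⟨y, mr⟩
    · have hl : r.length = 1 := by simpa using congrArg List.length hr
      omega
    · refine ⟨mr.reverse, y, z, ?_⟩
      have h2 : r = r.reverse.reverse := by simp
      rw [h2, hr]; simp

theorem stepA_eq (st : Int × List (List Int)) (c : List Int) :
    stepA st c = (st.1 + wCl c, st.2 ++ expandClause st.1 c) := by
  by_cases hle : (c.length : Int) ≤ 3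
  · simp only [stepA, expandClause, if_pos hle, wCl]
    refine Prod.ext ?_ rfl
    show st.1 = st.1 + max _ 0
    rw [max_eq_right (by omega)]; ring
  · have h4 : 4 ≤ c.length := by omega
    obtain ⟨c0, cr, rfl⟩ : ∃ c0 cr, c = c0 :: cr := by
      cases c with
      | nil => simp at h4
      | cons a b => exact ⟨a, b, rfl⟩
    obtain ⟨c1, r, rfl⟩ : ∃ c1 r, cr = c1 :: r := by
      cases cr with
      | nil => simp at h4
      | cons a b => exact ⟨a, b, rfl⟩
    obtain ⟨m, y, z, rfl⟩ : ∃ m y z, r = m ++ [y, z] := by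
      apply two_tail; simp at h4 ⊢; omega
    have hlen : (c0 :: c1 :: (m ++ [y, z])).length = m.length + 4 := by simp
    have hs0 : PySem.List.slice (c0 :: c1 :: (m ++ [y, z])) (some 0) (some 2) = [c0, c1] := by
      simp [PySem.List.slice, PySem.List.clampIdx]
    have hs2 : PySem.List.slice (c0 :: c1 :: (m ++ [y, z])) (some (-2)) none = [y, z] := by
      rw [PySem.List.slice_from_neg_ofNat _ 2 (by omega)]
      simp
    have htot : ((c0 :: c1 :: (m ++ [y, z])).length : Int) - 4 = (m.length : Int) := by
      rw [hlen]; push_cast; ring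
    have hw : wCl (c0 :: c1 :: (m ++ [y, z])) = (m.length : Int) + 1 := by
      unfold wCl; rw [hlen, max_eq_left (by push_cast; omega)]; push_cast; ring
    have hg1 : PySem.List.pyGetD (c0 :: c1 :: (m ++ [y, z])) 1 0 = c1 := by
      rw [show ((1:Int)) = ((1:Nat):Int) by norm_num, PySem.List.pyGetD_natCast]; rfl
    have hgm2 : PySem.List.pyGetD (c0 :: c1 :: (m ++ [y, z])) (-2) 0 = y := by
      rw [PySem.List.pyGetD_neg_ofNat _ 2 0 (by omega) (by rw [hlen]; omega)]
      simp [List.getElem_append_right]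
    have hgm1 : PySem.List.pyGetD (c0 :: c1 :: (m ++ [y, z])) (-1) 0 = z := by
      rw [PySem.List.pyGetD_neg_ofNat _ 1 0 (by omega) (by rw [hlen]; omega)]
      simp [List.getElem_append_right]
    have hL3 : ((c0 :: c1 :: (m ++ [y, z])).length : Int) - 3 = (m.length : Int) + 1 := by
      rw [hlen]; push_cast; ring
    have hmid : (PySem.List.pyRange 1 ((m.length : Int) + 1) 1).map
          (fun j => [st.1 + j, PySem.List.pyGetD (c0 :: c1 :: (m ++ [y, z])) (j + 1) 0,
                     -(st.1 + j + 1)])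
        = (List.range m.length).map
            (fun (j : Nat) => [st.1 + 1 + (j : Int),
              PySem.List.pyGetD (c0 :: c1 :: (m ++ [y, z])) (2 + (j : Int)) 0,
              -st.1 - 2 - (j : Int)]) := by
      rw [PySem.List.pyRange_one]
      have : ((m.length : Int) + 1 - 1).toNat = m.length := by omega
      rw [this, List.map_map]
      apply List.map_congr_left
      intro j _
      simp only [Function.comp_apply, List.cons.injEq, and_true]
      refine ⟨by ring, ?_, by ring⟩
      have : (1 : Int) + (j : Int) + 1 = 2 + (j : Int) := by ring
      rw [this]
    simp only [stepA, expandClause, if_neg hle, htot, hs0, hs2, hw, hL3,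
      PySem.List.pyGetD_zero_cons, hg1, hgm2, hgm1]
    rw [amid_closed, hmid]
    refine Prod.ext ?_ ?_
    · show _ + _ + 1 = _ + (_ + 1)
      ring
    · show _ ++ [_] = _ ++ _
      have h1 : -st.1 - 1 = -(st.1 + 1) := by ring
      have h2 : st.1 + (m.length : Int) + 1 = st.1 + ((m.length : Int) + 4) - 3 := by ring
      rw [h1, h2]
      simp [List.append_assoc]
      omega

theorem foldA_eq (cs : List (List Int)) (n : Int) (acc : List (List Int)) :
    cs.foldl stepA (n, acc) = (nFin n cs, acc ++ goRef n cs) := by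
  induction cs generalizing n acc with
  | nil => simp [nFin, goRef]
  | cons c cs ih =>
    rw [List.foldl_cons, stepA_eq, ih]
    simp [nFin, goRef]

-- ===== VERDICT (by name: the statement is the Claim_ definition above) =====
theorem to_3_sat_spec : Claim_equal_to_3_sat := by
  intro n clauses _
  show to_3_sat n clauses = to_3_sat_alt n clauses
  rw [alt_eq_goRef]
  unfold to_3_sat
  rw [foldA_eq]
  simp
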